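-- pv_equiv track=rewrite | github.com/mushinako/Google-Code-Jam-2018 | 02-1A/01-Waffle_Choppers/solution.py | waffle_choppers
-- ===== SOURCE A (Python) =====
-- def waffle_choppers(w, r, c, h, v):
--     # Arrays of chips in each row/column
--     r_count = [i.count('@') for i in w]
--     c_count = [i.count('@') for i in zip(*w)]
--
--     # Number of total chips must be divisible by the number of people
--     total = sum(r_count)
--     people = (h+1) * (v+1)
--     if total % people:
--         return False
--
--     # The chops must divide the waffle into pieces with equal number of chips
--     r_acc = 0
--     r_chop = [0]
--     r_tar = total // (h+1)
--     for j in range(r):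
--         r_acc += r_count[j]
--         if r_acc == r_tar:
--             r_acc = 0
--             r_chop.append(j+1)
--         elif r_acc > r_tar:
--             return False
--
--     c_acc = 0
--     c_chop = [0]
--     c_tar = total // (v+1)
--     for j in range(c):
--         c_acc += c_count[j]
--         if c_acc == c_tar:
--             c_acc = 0
--             c_chop.append(j+1)
--         elif c_acc > c_tar:
--             return False
--
--     # Verify each piece has the number of chips as it should
--     each = total // people
--     for m in range(1, len(r_chop)):
--         for n in range(1, len(c_chop)):
--             if sum([i[c_chop[n-1]:c_chop[n]].count('@')
--                     for i in w[r_chop[m-1]:r_chop[m]]]) != each: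
--                 return False
--
--     return True
-- ===== SOURCE B (Python) =====
-- from itertools import accumulate
--
--
-- def _boundaries(pref, n, tar):
--     # Chop positions are exactly the indices where the cumulative chip count
--     # reaches the next multiple of tar; overshooting a multiple is fatal.
--     chops = [0]
--     for j in range(n):
--         d = pref[j + 1] - tar * (len(chops) - 1)
--         if d == tar:
--             chops.append(j + 1)
--         elif d > tar:
--             return None
--     return chops
--
--
-- def waffle_choppers(w, r, c, h, v):
--     R = len(w)
--     W = min((len(s) for s in w), default=0)
--
--     total = sum(s.count('@') for s in w)
--     people = (h + 1) * (v + 1)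
--     if total % people:
--         return False
--
--     # 2D prefix-sum table: P[i][j] = chips in rows w[:i] restricted to columns [:j]
--     def _rowpref(s):
--         return list(accumulate((1 if ch == '@' else 0 for ch in s[:W]), initial=0))
--
--     P = list(accumulate(w, lambda prev, s: [a + b for a, b in zip(prev, _rowpref(s))],
--                         initial=[0] * (W + 1)))
--
--     row_pref = list(accumulate((s.count('@') for s in w), initial=0))
--     rb = _boundaries(row_pref, r, total // (h + 1))
--     if rb is None:
--         return False
--     cb = _boundaries(P[R], c, total // (v + 1))
--     if cb is None:
--         return False
--
--     each = total // people
--     for r1, r2 in zip(rb, rb[1:]):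
--         for c1, c2 in zip(cb, cb[1:]):
--             if P[r2][c2] - P[r1][c2] - P[r2][c1] + P[r1][c1] != each:
--                 return False
--     return True
-- ===== Notes on version B (the rewrite author's own statement) =====
-- stated objective: alternative
-- what changed: B precomputes a 2D prefix-sum table and cumulative chip counts, finds chop boundaries by comparing prefix values against target multiples (no running accumulator reset), and checks each piece with an O(1) inclusion-exclusion lookup instead of re-counting '@' over row/column slices.
-- outside the precondition, e.g. on waffle_choppers(['@@@@'], 5, 4, 1, 0): A returns False, B returns False
import Mathlib
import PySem

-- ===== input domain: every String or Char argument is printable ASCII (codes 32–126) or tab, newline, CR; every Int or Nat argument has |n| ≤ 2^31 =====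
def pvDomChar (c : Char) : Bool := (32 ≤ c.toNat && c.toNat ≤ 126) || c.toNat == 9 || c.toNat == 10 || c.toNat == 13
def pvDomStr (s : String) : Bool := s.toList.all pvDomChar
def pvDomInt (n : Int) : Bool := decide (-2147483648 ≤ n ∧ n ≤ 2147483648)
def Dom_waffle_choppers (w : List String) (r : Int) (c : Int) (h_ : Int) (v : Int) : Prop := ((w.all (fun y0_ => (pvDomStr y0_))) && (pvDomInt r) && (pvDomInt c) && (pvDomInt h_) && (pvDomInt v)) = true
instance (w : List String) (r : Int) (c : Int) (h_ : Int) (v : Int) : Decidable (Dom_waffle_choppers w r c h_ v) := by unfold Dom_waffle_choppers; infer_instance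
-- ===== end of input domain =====

-- B replaces A's per-piece slice re-counting by a 2D prefix-sum table with inclusion-exclusion
-- lookups and finds chop boundaries by comparing cumulative prefixes against target multiples
-- (alternative algorithm of the same asymptotic cost; not claimed faster).


-- ===== PORT A =====
-- i.count('@') on a string
def wcCnt (s : String) : Int := ((PySem.Str.count s "@" : Nat) : Int)
-- number of columns of zip(*w): the minimum row length (0 for no rows)
def wcWidth (w : List String) : Nat :=
  match w.map (fun s => s.toList.length) with
  | [] => 0
  | x :: xs => xs.foldl min x
-- zip(*w): list of columns; j < every row length, so the getD default is never read
def wcCols (w : List String) : List (List Char) :=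
  (List.range (wcWidth w)).map (fun j => w.map (fun s => s.toList.getD j ' '))
-- the 'for j in range(n)' chop loop with accumulator reset and early return (fuel = n)
def wcChopLoop (counts : List Int) (tar : Int) : Nat → Nat → Int → List Int → Option (List Int)
  | 0, _, _, chop => some chop
  | fuel+1, j, acc, chop =>
    let acc' := acc + counts.getD j 0   -- counts[j]; in range under Pre_, Python raises otherwise
    if acc' = tar then wcChopLoop counts tar fuel (j+1) 0 (chop ++ [(j:Int)+1])
    else if tar < acc' then none
    else wcChopLoop counts tar fuel (j+1) acc' chop
-- sum([i[a':b'].count('@') for i in w[a:b]])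
def wcPieceSum (w : List String) (a b a' b' : Int) : Int :=
  ((PySem.List.slice w (some a) (some b)).map
    (fun i => ((PySem.Chars.count (PySem.List.slice i.toList (some a') (some b')) ['@'] : Nat) : Int))).sum
-- the nested 'for m in range(1, len(r_chop))' piece loops (m = m'+1, n = n'+1); early return False = all
def wcCheckPieces (w : List String) (r_chop c_chop : List Int) (each : Int) : Bool :=
  (List.range (r_chop.length - 1)).all (fun m' =>
    (List.range (c_chop.length - 1)).all (fun n' =>
      wcPieceSum w (r_chop.getD m' 0) (r_chop.getD (m'+1) 0)
        (c_chop.getD n' 0) (c_chop.getD (n'+1) 0) == each))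

def waffle_choppers (w : List String) (r : Int) (c : Int) (h_ : Int) (v : Int) : Bool :=
  let r_count := w.map wcCnt
  let c_count := (wcCols w).map (fun col => ((col.count '@' : Nat) : Int))  -- tuple.count('@') counts elements
  let total := r_count.sum
  let people := (h_ + 1) * (v + 1)
  if PySem.Int.mod total people ≠ 0 then false
  else
    match wcChopLoop r_count (PySem.Int.floordiv total (h_+1)) r.toNat 0 0 [0] with
    | none => false
    | some r_chop =>
      match wcChopLoop c_count (PySem.Int.floordiv total (v+1)) c.toNat 0 0 [0] with
      | none => false
      | some c_chop => wcCheckPieces w r_chop c_chop (PySem.Int.floordiv total people)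

-- ===== PORT B =====
-- s.count('@')
def altCnt (s : String) : Int := ((PySem.Str.count s "@" : Nat) : Int)
-- itertools.accumulate(xs, initial=a)
def altCumsum (a : Int) : List Int → List Int
  | [] => [a]
  | x :: xs => a :: altCumsum (a + x) xs
-- _rowpref(s): prefix chip counts of s[:W]
def altRowPref (s : String) (wd : Nat) : List Int :=
  altCumsum 0 ((s.toList.take wd).map (fun ch => if ch = '@' then (1:Int) else 0))
-- itertools.accumulate(w, rowwise-add of _rowpref, initial=[0]*(W+1)): the prefix table P
def altScanP (wd : Nat) (prev : List Int) : List String → List (List Int)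
  | [] => [prev]
  | s :: ss => prev :: altScanP wd (List.zipWith (· + ·) prev (altRowPref s wd)) ss
-- min((len(s) for s in w), default=0)
def altWidth (w : List String) : Nat :=
  match w.map (fun s => s.toList.length) with
  | [] => 0
  | x :: xs => xs.foldl min x
-- _boundaries: chop exactly where the cumulative prefix hits the next multiple of tar (fuel = n)
def altBoundGo (pref : List Int) (tar : Int) : Nat → Nat → List Int → Option (List Int)
  | 0, _, chops => some chops
  | fuel+1, j, chops =>
    let d := pref.getD (j+1) 0 - tar * ((chops.length : Int) - 1)  -- pref[j+1]; in range under Pre_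
    if d = tar then altBoundGo pref tar fuel (j+1) (chops ++ [(j:Int)+1])
    else if tar < d then none
    else altBoundGo pref tar fuel (j+1) chops
-- P[i][j]
def altAt (P : List (List Int)) (i j : Int) : Int :=
  PySem.List.pyGetD (PySem.List.pyGetD P i []) j 0
-- the piece check over consecutive boundary pairs, by inclusion-exclusion on P
def altPieceOk (P : List (List Int)) (rb cb : List Int) (each : Int) : Bool :=
  (rb.zip rb.tail).all (fun p =>
    (cb.zip cb.tail).all (fun q =>
      altAt P p.2 q.2 - altAt P p.1 q.2 - altAt P p.2 q.1 + altAt P p.1 q.1 == each))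

def waffle_choppers_alt (w : List String) (r : Int) (c : Int) (h_ : Int) (v : Int) : Bool :=
  let wd := altWidth w
  let total := (w.map altCnt).sum
  let people := (h_ + 1) * (v + 1)
  if PySem.Int.mod total people ≠ 0 then false
  else
    let P := altScanP wd (List.replicate (wd+1) 0) w
    let row_pref := altCumsum 0 (w.map altCnt)
    match altBoundGo row_pref (PySem.Int.floordiv total (h_+1)) r.toNat 0 [0] with
    | none => false
    | some rb =>
      match altBoundGo (PySem.List.pyGetD P ((w.length : Nat) : Int) []) (PySem.Int.floordiv total (v+1)) c.toNat 0 [0] with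
      | none => false
      | some cb => altPieceOk P rb cb (PySem.Int.floordiv total people)

-- ===== PRECONDITION & SPEC =====
-- Pre_ excludes h = -1 / v = -1 (ZeroDivisionError in A) and, when the chip total divides evenly
-- into the pieces, r beyond the number of rows or c beyond the shortest row (A's index loops can
-- raise IndexError there; on some such inputs A still returns False early — see the claim's cites).
def Pre_waffle_choppers (w : List String) (r : Int) (c : Int) (h_ : Int) (v : Int) : Prop :=
  h_ ≠ -1 ∧ v ≠ -1 ∧
  (¬ ((h_ + 1) * (v + 1)) ∣ (w.map (fun s => ((s.toList.count '@' : Nat) : Int))).sum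
   ∨ (r ≤ (w.length : Int) ∧
      c ≤ (((match w.map (fun s => s.toList.length) with
             | [] => 0
             | x :: xs => xs.foldl min x) : Nat) : Int)))
instance (w : List String) (r : Int) (c : Int) (h_ : Int) (v : Int) : Decidable (Pre_waffle_choppers w r c h_ v) := by unfold Pre_waffle_choppers; infer_instance
def pvWitness_waffle_choppers : List String × Int × Int × Int × Int := (["@@", "@@"], 2, 2, 1, 1)

def Spec_waffle_choppers (w : List String) (r : Int) (c : Int) (h_ : Int) (v : Int) (out : Bool) : Prop := out = waffle_choppers_alt w r c h_ v
instance (w : List String) (r : Int) (c : Int) (h_ : Int) (v : Int) (out : Bool) : Decidable (Spec_waffle_choppers w r c h_ v out) := by unfold Spec_waffle_choppers; infer_instance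

-- ===== CLAIM (what is proved, stated in full; the proofs are below) =====
def Claim_equal_waffle_choppers : Prop := ∀ (w : List String) (r : Int) (c : Int) (h_ : Int) (v : Int), Dom_waffle_choppers w r c h_ v → Pre_waffle_choppers w r c h_ v → Spec_waffle_choppers w r c h_ v (waffle_choppers w r c h_ v)

-- ===== LEMMAS AND PROOFS =====

-- Python str.count with a single-character needle counts exactly the occurrences of that character.
theorem pv_count_go_single (l : List Char) : ∀ (fuel acc : Nat), l.length ≤ fuel → PySem.Chars.count.go ['@'] fuel l acc = acc + l.count '@' := by
  induction l with
  | nil => intro fuel acc h; cases fuel <;> simp [PySem.Chars.count.go]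
  | cons x t ih =>
    intro fuel acc h
    cases fuel with
    | zero => simp at h
    | succ f =>
      by_cases hx : x = '@'
      · subst hx
        rw [show PySem.Chars.count.go ['@'] (f+1) ('@' :: t) acc = PySem.Chars.count.go ['@'] f t (acc+1) by simp [PySem.Chars.count.go]]
        rw [ih f (acc+1) (by simpa using h)]
        simp; omega
      · have hx' : ¬('@' = x) := fun hh => hx hh.symm
        rw [show PySem.Chars.count.go ['@'] (f+1) (x :: t) acc = PySem.Chars.count.go ['@'] f t acc by simp [PySem.Chars.count.go, List.isPrefixOf, hx']]
        rw [ih f acc (by simpa using h)]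
        simp [hx]

theorem pv_count_single (s : List Char) : PySem.Chars.count s ['@'] = s.count '@' := by
  simpa [PySem.Chars.count] using pv_count_go_single s s.length 0 le_rfl

theorem wcCnt_eq (s : String) : wcCnt s = ((s.toList.count '@' : Nat) : Int) := by
  unfold wcCnt
  rw [PySem.Str.count_eq, show "@".toList = ['@'] from rfl, pv_count_single]

theorem altCnt_eq_wcCnt : altCnt = wcCnt := rfl

-- generic helpers --------------------------------------------------------

theorem pv_all_congr_mem {α : Type} (l : List α) (f g : α → Bool) (h : ∀ x ∈ l, f x = g x) :
    l.all f = l.all g := by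
  induction l with
  | nil => rfl
  | cons x t ih =>
    simp only [List.all_cons, h x (by simp)]
    rw [ih (fun y hy => h y (by simp [hy]))]

theorem pv_pairwise_zip_tail {l : List Int} (h : l.Pairwise (· < ·)) :
    ∀ p ∈ l.zip l.tail, p.1 < p.2 := by
  induction l with
  | nil => simp
  | cons x t ih =>
    cases t with
    | nil => simp
    | cons y u =>
      intro p hp
      rcases List.mem_cons.mp hp with h1 | h2
      · subst h1; exact (List.pairwise_cons.mp h).1 y (by simp)
      · exact ih ((List.pairwise_cons.mp h).2) p h2

theorem pv_mem_zip_tail {l : List Int} (p : Int × Int) (h : p ∈ l.zip l.tail) :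
    p.1 ∈ l ∧ p.2 ∈ l := by
  have h' : (p.1, p.2) ∈ l.zip l.tail := by simpa using h
  obtain ⟨h1, h2⟩ := List.of_mem_zip h'
  exact ⟨h1, List.mem_of_mem_tail h2⟩

theorem pv_all_adjacent_aux (f : Int → Int → Bool) :
    ∀ (l : List Int) (x : Int),
    (List.range l.length).all (fun m => f ((x :: l).getD m 0) ((x :: l).getD (m+1) 0)) =
      ((x :: l).zip l).all (fun p => f p.1 p.2) := by
  intro l
  induction l with
  | nil => intro x; rfl
  | cons y u ih =>
    intro x
    simp only [List.length_cons, List.range_succ_eq_map, List.all_cons, List.all_map]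
    have := ih y
    simp only [List.zip_cons_cons, List.all_cons]
    rw [← this]
    rfl

theorem pv_all_adjacent (l : List Int) (f : Int → Int → Bool) :
    (List.range (l.length - 1)).all (fun m => f (l.getD m 0) (l.getD (m+1) 0)) =
      (l.zip l.tail).all (fun p => f p.1 p.2) := by
  cases l with
  | nil => rfl
  | cons x t => simpa using pv_all_adjacent_aux f t x

-- cumulative sums ---------------------------------------------------------

theorem cumsum_length (xs : List Int) : ∀ a, (altCumsum a xs).length = xs.length + 1 := by
  induction xs with
  | nil => intro a; rfl
  | cons x t ih => intro a; simp [altCumsum, ih]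

theorem cumsum_getD (xs : List Int) : ∀ (a : Int) (k : Nat), k ≤ xs.length →
    (altCumsum a xs).getD k 0 = a + (xs.take k).sum := by
  induction xs with
  | nil => intro a k h; simp at h; subst h; simp [altCumsum]
  | cons x t ih =>
    intro a k h
    cases k with
    | zero => simp [altCumsum]
    | succ m =>
      simp only [altCumsum, List.getD_cons_succ, List.take_succ_cons, List.sum_cons]
      rw [ih (a + x) m (by simpa using h)]
      ring

theorem take_sum_succ (xs : List Int) (k : Nat) (h : k < xs.length) :
    (xs.take (k+1)).sum = (xs.take k).sum + xs.getD k 0 := by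
  rw [List.take_add_one, List.sum_append]
  simp [List.getElem?_eq_getElem h, List.getD]

-- the two chop loops agree ------------------------------------------------

theorem loop_agree (counts pref : List Int) (tar : Int) :
    ∀ (fuel j : Nat) (acc : Int) (chop : List Int),
    (∀ k, j ≤ k → k < j + fuel → pref.getD (k+1) 0 = pref.getD k 0 + counts.getD k 0) →
    pref.getD j 0 = acc + tar * ((chop.length : Int) - 1) →
    wcChopLoop counts tar fuel j acc chop = altBoundGo pref tar fuel j chop := by
  intro fuel
  induction fuel with
  | zero => intro j acc chop _ _; rfl
  | succ f ih =>
    intro j acc chop hstep hinv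
    have hd : pref.getD (j+1) 0 - tar * ((chop.length : Int) - 1) = acc + counts.getD j 0 := by
      rw [hstep j le_rfl (by omega), hinv]; ring
    simp only [wcChopLoop, altBoundGo, hd]
    by_cases h1 : acc + counts.getD j 0 = tar
    · simp only [h1, if_true]
      exact ih (j+1) 0 (chop ++ [(j:Int)+1])
        (fun k hk1 hk2 => hstep k (by omega) (by omega))
        (by rw [hstep j le_rfl (by omega), hinv, List.length_append]
            simp only [List.length_cons, List.length_nil]
            push_cast
            linear_combination h1)
    · rw [if_neg h1, if_neg h1]
      by_cases h2 : tar < acc + counts.getD j 0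
      · rw [if_pos h2, if_pos h2]
      · rw [if_neg h2, if_neg h2]
        exact ih (j+1) (acc + counts.getD j 0) chop
          (fun k hk1 hk2 => hstep k (by omega) (by omega))
          (by rw [hstep j le_rfl (by omega), hinv]; ring)

theorem chop_out_props (counts : List Int) (tar : Int) :
    ∀ (fuel j : Nat) (acc : Int) (chop out : List Int),
    wcChopLoop counts tar fuel j acc chop = some out →
    (∀ x ∈ chop, 0 ≤ x ∧ x ≤ (j : Int)) → chop.Pairwise (· < ·) →
    (∀ x ∈ out, 0 ≤ x ∧ x ≤ (j : Int) + (fuel : Nat)) ∧ out.Pairwise (· < ·) := by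
  intro fuel
  induction fuel with
  | zero =>
    intro j acc chop out hout hb hp
    simp only [wcChopLoop, Option.some.injEq] at hout
    subst hout
    exact ⟨fun x hx => ⟨(hb x hx).1, by have := (hb x hx).2; push_cast; omega⟩, hp⟩
  | succ f ih =>
    intro j acc chop out hout hb hp
    simp only [wcChopLoop] at hout
    by_cases h1 : acc + counts.getD j 0 = tar
    · rw [if_pos h1] at hout
      have hb' : ∀ x ∈ chop ++ [(j:Int)+1], 0 ≤ x ∧ x ≤ ((j+1 : Nat) : Int) := by
        intro x hx
        rcases List.mem_append.mp hx with h | h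
        · have := hb x h
          exact ⟨this.1, by have := this.2; push_cast; omega⟩
        · simp at h; subst h; constructor <;> push_cast <;> omega
      have hp' : (chop ++ [(j:Int)+1]).Pairwise (· < ·) := by
        rw [List.pairwise_append]
        refine ⟨hp, by simp, ?_⟩
        intro x hx y hy
        simp at hy; subst hy
        have := (hb x hx).2; omega
      have := ih (j+1) 0 _ out hout hb' hp'
      refine ⟨fun x hx => ⟨(this.1 x hx).1, ?_⟩, this.2⟩
      have := (this.1 x hx).2; push_cast at this ⊢; omega
    · rw [if_neg h1] at hout
      by_cases h2 : tar < acc + counts.getD j 0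
      · rw [if_pos h2] at hout; exact absurd hout (by simp)
      · rw [if_neg h2] at hout
        have hb' : ∀ x ∈ chop, 0 ≤ x ∧ x ≤ ((j+1 : Nat) : Int) := by
          intro x hx
          have := hb x hx
          exact ⟨this.1, by have := this.2; push_cast; omega⟩
        have := ih (j+1) _ chop out hout hb' hp
        refine ⟨fun x hx => ⟨(this.1 x hx).1, ?_⟩, this.2⟩
        have := (this.1 x hx).2; push_cast at this ⊢; omega

-- the prefix table --------------------------------------------------------

theorem rowPref_length (s : String) (wd : Nat) (hs : wd ≤ s.toList.length) :
    (altRowPref s wd).length = wd + 1 := by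
  unfold altRowPref
  rw [cumsum_length, List.length_map, List.length_take]
  omega

theorem rowPref_getD (s : String) (wd k : Nat) (hs : wd ≤ s.toList.length) (hk : k ≤ wd) :
    (altRowPref s wd).getD k 0 = ((s.toList.take k).count '@' : Nat) := by
  unfold altRowPref
  have hlen : ((s.toList.take wd).map (fun ch => if ch = '@' then (1:Int) else 0)).length = wd := by
    rw [List.length_map, List.length_take]; omega
  rw [cumsum_getD _ _ _ (by rw [hlen]; exact hk)]
  rw [← List.map_take, List.take_take, min_eq_left hk]
  have hfun : (fun ch => if ch = '@' then (1:Int) else 0) =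
      (fun ch : Char => if (ch == '@') then (1:Int) else 0) := by
    funext ch; simp [beq_iff_eq]
  rw [hfun, PySem.List.sum_map_ite_one_zero]
  simp [List.count]

theorem width_le (w : List String) (s : String) (hs : s ∈ w) : wcWidth w ≤ s.toList.length := by
  unfold wcWidth
  have hmem : s.toList.length ∈ w.map (fun s => s.toList.length) := List.mem_map_of_mem hs
  cases hw : w.map (fun s => s.toList.length) with
  | nil => rw [hw] at hmem; exact absurd hmem (by simp)
  | cons x xs =>
    rw [hw] at hmem
    rcases List.mem_cons.mp hmem with h1 | h2
    · subst h1
      exact (PySem.List.foldl_min_le xs s.toList.length).1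
    · exact (PySem.List.foldl_min_le xs x).2 _ h2

theorem zip_add_getD (a b : List Int) (k : Nat) (ha : k < a.length) (hb : k < b.length) :
    (List.zipWith (· + ·) a b).getD k 0 = a.getD k 0 + b.getD k 0 := by
  have hlen : k < (List.zipWith (· + ·) a b).length := by simp [List.length_zipWith]; omega
  rw [List.getD_eq_getElem _ _ hlen, List.getD_eq_getElem _ _ ha, List.getD_eq_getElem _ _ hb]
  exact List.getElem_zipWith ..

theorem scan_entry (wd : Nat) : ∀ (ss : List String) (prev : List Int),
    prev.length = wd + 1 → (∀ s ∈ ss, wd ≤ s.toList.length) →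
    ∀ i, i ≤ ss.length → ∀ k, k ≤ wd →
    ((altScanP wd prev ss).getD i []).getD k 0 =
      prev.getD k 0 + ((ss.take i).map (fun s => (altRowPref s wd).getD k 0)).sum := by
  intro ss
  induction ss with
  | nil =>
    intro prev hprev hw i hi k hk
    simp at hi; subst hi; simp [altScanP]
  | cons s t ih =>
    intro prev hprev hw i hi k hk
    cases i with
    | zero => simp [altScanP]
    | succ m =>
      simp only [altScanP, List.getD_cons_succ, List.take_succ_cons, List.map_cons, List.sum_cons]
      have hs : wd ≤ s.toList.length := hw s (by simp)
      have hlen : (List.zipWith (· + ·) prev (altRowPref s wd)).length = wd + 1 := by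
        rw [List.length_zipWith, hprev, rowPref_length s wd hs]; simp
      rw [ih _ hlen (fun x hx => hw x (by simp [hx])) m (by simpa using hi) k hk]
      rw [zip_add_getD _ _ k (by omega) (by rw [rowPref_length s wd hs]; omega)]
      ring

-- counting helpers --------------------------------------------------------

def pvInd (k : Nat) (s : String) : Int := if s.toList.getD k ' ' = '@' then 1 else 0
def pvK (k : Nat) (s : String) : Int := ((s.toList.take k).count '@' : Nat)
def pvSE (w : List String) (i k : Nat) : Int := ((w.take i).map (pvK k)).sum

theorem pv_sum_map_sub {α : Type} (l : List α) (f g : α → Int) :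
    (l.map (fun x => f x - g x)).sum = (l.map f).sum - (l.map g).sum := by
  induction l with
  | nil => simp
  | cons x t ih => simp [ih]; ring

theorem pv_sum_take_split {α : Type} (w : List α) (f : α → Int) (na nb : Nat) (h : na ≤ nb) :
    (((w.drop na).take (nb - na)).map f).sum = ((w.take nb).map f).sum - ((w.take na).map f).sum := by
  have : w.take nb = w.take na ++ (w.drop na).take (nb - na) := by
    rw [← List.take_add]
    congr 1
    omega
  rw [this, List.map_append, List.sum_append]
  ring

theorem pv_count_take_step (s : String) (k : Nat) (hk : k < s.toList.length) :
    pvK (k+1) s = pvK k s + pvInd k s := by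
  unfold pvK pvInd
  rw [List.take_add_one, List.count_append, List.getD_eq_getElem _ _ hk,
      List.getElem?_eq_getElem hk]
  by_cases hx : s.toList[k] = '@' <;> simp [hx]

theorem pv_rowPref_pvK (s : String) (wd k : Nat) (hs : wd ≤ s.toList.length) (hk : k ≤ wd) :
    (altRowPref s wd).getD k 0 = pvK k s := rowPref_getD s wd k hs hk

theorem pv_ccount_getD (w : List String) (k : Nat) (hk : k < wcWidth w) :
    ((wcCols w).map (fun col => ((col.count '@' : Nat) : Int))).getD k 0 =
      (w.map (pvInd k)).sum := by
  unfold wcCols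
  rw [List.map_map]
  rw [PySem.List.getD_map_range _ _ _ _ hk]
  simp only [Function.comp]
  rw [show (w.map (fun s => s.toList.getD k ' ')).count '@' =
      (w.map (fun s => s.toList.getD k ' ')).countP (· == '@') from rfl]
  rw [List.countP_map]
  have : (w.map (pvInd k)).sum = (w.map (fun s : String =>
      if ((fun x => x == '@') ∘ fun s : String => s.toList.getD k ' ') s then (1:Int) else 0)).sum := by
    apply congrArg
    apply List.map_congr_left
    intro s _
    simp [pvInd, Function.comp, beq_iff_eq]
  rw [this, PySem.List.sum_map_ite_one_zero]

-- the last row of the prefix table ----------------------------------------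

theorem pv_Plast_getD (w : List String) (k : Nat) (hk : k ≤ wcWidth w) :
    ((altScanP (wcWidth w) (List.replicate (wcWidth w + 1) 0) w).getD w.length []).getD k 0 =
      (w.map (pvK k)).sum := by
  rw [scan_entry (wcWidth w) w _ (by simp) (fun s hs => width_le w s hs) w.length le_rfl k hk]
  rw [List.getD_eq_getElem _ _ (by simp; omega), List.getElem_replicate]
  rw [List.take_length]
  rw [List.map_congr_left (fun s hs => pv_rowPref_pvK s _ k (width_le w s hs) hk)]
  simp

theorem pv_colpref_step (w : List String) (k : Nat) (hk : k < wcWidth w) :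
    ((altScanP (wcWidth w) (List.replicate (wcWidth w + 1) 0) w).getD w.length []).getD (k+1) 0 =
      ((altScanP (wcWidth w) (List.replicate (wcWidth w + 1) 0) w).getD w.length []).getD k 0 +
      ((wcCols w).map (fun col => ((col.count '@' : Nat) : Int))).getD k 0 := by
  rw [pv_Plast_getD w (k+1) (by omega), pv_Plast_getD w k (by omega), pv_ccount_getD w k hk]
  rw [List.map_congr_left (fun s hs => pv_count_take_step s k (by have := width_le w s hs; omega))]
  rw [show (fun s => pvK k s + pvInd k s) = (fun s => pvK k s + pvInd k s) from rfl]
  rw [PySem.List.sum_map_add_int]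

-- piece sums --------------------------------------------------------------

theorem pv_altAt (w : List String) (i k : Int) (hi0 : 0 ≤ i) (hiR : i ≤ (w.length : Int))
    (hk0 : 0 ≤ k) (hkW : k ≤ (wcWidth w : Int)) :
    altAt (altScanP (wcWidth w) (List.replicate (wcWidth w + 1) 0) w) i k =
      pvSE w i.toNat k.toNat := by
  unfold altAt pvSE
  rw [show i = ((i.toNat : Nat) : Int) by omega, PySem.List.pyGetD_natCast]
  rw [show k = ((k.toNat : Nat) : Int) by omega, PySem.List.pyGetD_natCast]
  rw [scan_entry (wcWidth w) w _ (by simp) (fun s hs => width_le w s hs) i.toNat (by omega)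
      k.toNat (by omega)]
  rw [List.getD_eq_getElem _ _ (by simp; omega), List.getElem_replicate]
  rw [List.map_congr_left (fun s hs => pv_rowPref_pvK s _ k.toNat (width_le w s (List.mem_of_mem_take hs)) (by omega))]
  simp
  have h1 : (max i 0).toNat = i.toNat := by omega
  have h2 : (max k 0).toNat = k.toNat := by omega
  rw [h1, h2]

theorem pv_slice_count (l : List Char) (a b : Int) (ha : 0 ≤ a) (hab : a ≤ b) :
    ((PySem.Chars.count (PySem.List.slice l (some a) (some b)) ['@'] : Nat) : Int) =
      ((l.take b.toNat).count '@' : Nat) - ((l.take a.toNat).count '@' : Nat) := by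
  rw [pv_count_single, PySem.List.slice_toNat _ ha (by omega)]
  have hsplit : l.take b.toNat = l.take a.toNat ++ (l.drop a.toNat).take (b.toNat - a.toNat) := by
    rw [← List.take_add]
    congr 1
    omega
  have : (l.take b.toNat).count '@' = (l.take a.toNat).count '@' +
      ((l.drop a.toNat).take (b.toNat - a.toNat)).count '@' := by
    rw [hsplit, List.count_append]
  omega

theorem pv_pieceA (w : List String) (a b a' b' : Int) (ha : 0 ≤ a) (hab : a ≤ b)
    (ha' : 0 ≤ a') (hab' : a' ≤ b') :
    wcPieceSum w a b a' b' =
      pvSE w b.toNat b'.toNat - pvSE w a.toNat b'.toNat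
        - (pvSE w b.toNat a'.toNat - pvSE w a.toNat a'.toNat) := by
  unfold wcPieceSum
  rw [PySem.List.slice_toNat _ ha (by omega)]
  rw [List.map_congr_left (fun s _ => pv_slice_count s.toList a' b' ha' hab')]
  rw [pv_sum_map_sub]
  unfold pvSE pvK
  rw [pv_sum_take_split w _ a.toNat b.toNat (by omega)]
  rw [pv_sum_take_split w _ a.toNat b.toNat (by omega)]

theorem altWidth_eq : altWidth = wcWidth := rfl

theorem pvK_zero (s : String) : pvK 0 s = 0 := by simp [pvK]

-- ===== VERDICT (by name: the statement is the Claim_ definition above) =====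
theorem waffle_choppers_spec : Claim_equal_waffle_choppers := by
  intro w r c h_ v hdom hpre
  unfold Spec_waffle_choppers
  obtain ⟨hh, hv, hdis⟩ := hpre
  unfold waffle_choppers waffle_choppers_alt
  rw [altCnt_eq_wcCnt, altWidth_eq]
  dsimp only
  by_cases hmod : PySem.Int.mod ((w.map wcCnt).sum) ((h_ + 1) * (v + 1)) = 0
  case neg => simp [hmod]
  case pos =>
  have hdvd : ((h_+1)*(v+1)) ∣ (w.map wcCnt).sum := (PySem.Int.mod_eq_zero_iff_dvd _ _).mp hmod
  have hwc : w.map wcCnt = w.map (fun s => ((s.toList.count '@' : Nat) : Int)) :=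
    List.map_congr_left (fun s _ => wcCnt_eq s)
  rcases hdis with hnd | ⟨hr, hc⟩
  · exact absurd (hwc ▸ hdvd) hnd
  have hc' : c ≤ ((wcWidth w : Nat) : Int) := hc
  have hrn : r.toNat ≤ w.length := by omega
  have hcn : c.toNat ≤ wcWidth w := by omega
  simp only [hmod, ne_eq, not_true_eq_false, if_false]
  -- row chop loops agree
  have hlenc : (w.map wcCnt).length = w.length := by simp
  have hrowstep : ∀ k, 0 ≤ k → k < 0 + r.toNat →
      (altCumsum 0 (w.map wcCnt)).getD (k+1) 0 =
        (altCumsum 0 (w.map wcCnt)).getD k 0 + (w.map wcCnt).getD k 0 := by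
    intro k _ hk
    rw [cumsum_getD _ _ (k+1) (by omega), cumsum_getD _ _ k (by omega),
        take_sum_succ _ k (by omega)]
    ring
  have hrloop := loop_agree (w.map wcCnt) (altCumsum 0 (w.map wcCnt))
    (PySem.Int.floordiv ((w.map wcCnt).sum) (h_+1)) r.toNat 0 0 [0] hrowstep
    (by rw [cumsum_getD _ _ 0 (by omega)]; simp)
  rw [hrloop]
  cases hres : altBoundGo (altCumsum 0 (w.map wcCnt))
      (PySem.Int.floordiv ((w.map wcCnt).sum) (h_+1)) r.toNat 0 [0] with
  | none => rfl
  | some rb =>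
  have hrprops := chop_out_props (w.map wcCnt) _ r.toNat 0 0 [0] rb (hrloop.trans hres)
    (by intro x hx; simp at hx; simp [hx]) (by simp)
  -- column chop loops agree
  have hcolstep : ∀ k, 0 ≤ k → k < 0 + c.toNat →
      (PySem.List.pyGetD (altScanP (wcWidth w) (List.replicate (wcWidth w + 1) 0) w)
          ((w.length : Nat) : Int) []).getD (k+1) 0 =
        (PySem.List.pyGetD (altScanP (wcWidth w) (List.replicate (wcWidth w + 1) 0) w)
          ((w.length : Nat) : Int) []).getD k 0 +
        ((wcCols w).map (fun col => ((col.count '@' : Nat) : Int))).getD k 0 := by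
    intro k _ hk
    rw [PySem.List.pyGetD_natCast]
    exact pv_colpref_step w k (by omega)
  have hcloop := loop_agree ((wcCols w).map (fun col => ((col.count '@' : Nat) : Int)))
    (PySem.List.pyGetD (altScanP (wcWidth w) (List.replicate (wcWidth w + 1) 0) w)
      ((w.length : Nat) : Int) [])
    (PySem.Int.floordiv ((w.map wcCnt).sum) (v+1)) c.toNat 0 0 [0] hcolstep
    (by rw [PySem.List.pyGetD_natCast, pv_Plast_getD w 0 (by omega),
            List.map_congr_left (fun s _ => pvK_zero s)]
        simp)
  rw [hcloop]
  cases hcres : altBoundGo (PySem.List.pyGetD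
      (altScanP (wcWidth w) (List.replicate (wcWidth w + 1) 0) w) ((w.length : Nat) : Int) [])
      (PySem.Int.floordiv ((w.map wcCnt).sum) (v+1)) c.toNat 0 [0] with
  | none => rfl
  | some cb =>
  dsimp only
  have hcprops := chop_out_props ((wcCols w).map (fun col => ((col.count '@' : Nat) : Int))) _
    c.toNat 0 0 [0] cb (hcloop.trans hcres)
    (by intro x hx; simp at hx; simp [hx]) (by simp)
  -- the piece checks agree
  unfold wcCheckPieces altPieceOk
  rw [pv_all_adjacent rb (fun a b => (List.range (cb.length - 1)).all
    (fun n' => wcPieceSum w a b (cb.getD n' 0) (cb.getD (n'+1) 0) ==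
      PySem.Int.floordiv ((w.map wcCnt).sum) ((h_+1)*(v+1))))]
  apply pv_all_congr_mem
  intro p hp
  rw [pv_all_adjacent cb (fun a' b' => wcPieceSum w p.1 p.2 a' b' ==
      PySem.Int.floordiv ((w.map wcCnt).sum) ((h_+1)*(v+1)))]
  apply pv_all_congr_mem
  intro q hq
  have hpb := pv_mem_zip_tail p hp
  have hqb := pv_mem_zip_tail q hq
  have hp1 := hrprops.1 p.1 hpb.1
  have hp2 := hrprops.1 p.2 hpb.2
  have hq1 := hcprops.1 q.1 hqb.1
  have hq2 := hcprops.1 q.2 hqb.2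
  have hplt : p.1 < p.2 := pv_pairwise_zip_tail hrprops.2 p hp
  have hqlt : q.1 < q.2 := pv_pairwise_zip_tail hcprops.2 q hq
  rw [pv_pieceA w p.1 p.2 q.1 q.2 hp1.1 (le_of_lt hplt) hq1.1 (le_of_lt hqlt)]
  rw [pv_altAt w p.2 q.2 hp2.1 (by have := hp2.2; push_cast at this ⊢; omega)
        hq2.1 (by have := hq2.2; push_cast at this ⊢; omega),
      pv_altAt w p.1 q.2 hp1.1 (by have := hp1.2; push_cast at this ⊢; omega)
        hq2.1 (by have := hq2.2; push_cast at this ⊢; omega),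
      pv_altAt w p.2 q.1 hp2.1 (by have := hp2.2; push_cast at this ⊢; omega)
        hq1.1 (by have := hq1.2; push_cast at this ⊢; omega),
      pv_altAt w p.1 q.1 hp1.1 (by have := hp1.2; push_cast at this ⊢; omega)
        hq1.1 (by have := hq1.2; push_cast at this ⊢; omega)]
  have harith : pvSE w p.2.toNat q.2.toNat - pvSE w p.1.toNat q.2.toNat
      - (pvSE w p.2.toNat q.1.toNat - pvSE w p.1.toNat q.1.toNat) =
      pvSE w p.2.toNat q.2.toNat - pvSE w p.1.toNat q.2.toNat
      - pvSE w p.2.toNat q.1.toNat + pvSE w p.1.toNat q.1.toNat := by ring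
  rw [harith]
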